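-- pv_equiv track=rewrite | github.com/BioGeMT/ParaDISM | giab_benchmark/plot_coverage_split_confusion.py | split_by_coverage
-- ===== SOURCE A (Python) =====
-- def split_by_coverage(
--     truth_variants: set[tuple[str, int, str, str]],
--     called_variants: set[tuple[str, int, str, str]],
--     depth_lookup: dict[tuple[str, int], int],
--     n: int,
-- ) -> dict[str, dict[str, int]]:
--     split = {"le_n": {"TP": 0, "FP": 0, "FN": 0}, "gt_n": {"TP": 0, "FP": 0, "FN": 0}}
--
--     for chrom, pos, ref, alt in truth_variants & called_variants:
--         bucket = "le_n" if depth_lookup.get((chrom, pos), 0) <= n else "gt_n"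
--         split[bucket]["TP"] += 1
--     for chrom, pos, ref, alt in called_variants - truth_variants:
--         bucket = "le_n" if depth_lookup.get((chrom, pos), 0) <= n else "gt_n"
--         split[bucket]["FP"] += 1
--     for chrom, pos, ref, alt in truth_variants - called_variants:
--         bucket = "le_n" if depth_lookup.get((chrom, pos), 0) <= n else "gt_n"
--         split[bucket]["FN"] += 1
--     return split
-- ===== SOURCE B (Python) =====
-- def split_by_coverage(
--     truth_variants: set[tuple[str, int, str, str]],
--     called_variants: set[tuple[str, int, str, str]],
--     depth_lookup: dict[tuple[str, int], int],
--     n: int,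
-- ) -> dict[str, dict[str, int]]:
--     # One pass over the union: derive the category from membership instead of
--     # materialising the three set-operation results.
--     split = {"le_n": {"TP": 0, "FP": 0, "FN": 0}, "gt_n": {"TP": 0, "FP": 0, "FN": 0}}
--     for chrom, pos, ref, alt in truth_variants | called_variants:
--         in_t = (chrom, pos, ref, alt) in truth_variants
--         in_c = (chrom, pos, ref, alt) in called_variants
--         category = "TP" if in_t and in_c else ("FP" if in_c else "FN")
--         bucket = "le_n" if depth_lookup.get((chrom, pos), 0) <= n else "gt_n"
--         split[bucket][category] += 1
--     return split
-- ===== Notes on version B (the rewrite author's own statement) =====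
-- stated objective: alternative
-- what changed: Replaces A's three passes over the materialised set operations (intersection, two differences) with one pass over the union whose branch derives the TP/FP/FN category from the two membership tests.
import Mathlib
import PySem

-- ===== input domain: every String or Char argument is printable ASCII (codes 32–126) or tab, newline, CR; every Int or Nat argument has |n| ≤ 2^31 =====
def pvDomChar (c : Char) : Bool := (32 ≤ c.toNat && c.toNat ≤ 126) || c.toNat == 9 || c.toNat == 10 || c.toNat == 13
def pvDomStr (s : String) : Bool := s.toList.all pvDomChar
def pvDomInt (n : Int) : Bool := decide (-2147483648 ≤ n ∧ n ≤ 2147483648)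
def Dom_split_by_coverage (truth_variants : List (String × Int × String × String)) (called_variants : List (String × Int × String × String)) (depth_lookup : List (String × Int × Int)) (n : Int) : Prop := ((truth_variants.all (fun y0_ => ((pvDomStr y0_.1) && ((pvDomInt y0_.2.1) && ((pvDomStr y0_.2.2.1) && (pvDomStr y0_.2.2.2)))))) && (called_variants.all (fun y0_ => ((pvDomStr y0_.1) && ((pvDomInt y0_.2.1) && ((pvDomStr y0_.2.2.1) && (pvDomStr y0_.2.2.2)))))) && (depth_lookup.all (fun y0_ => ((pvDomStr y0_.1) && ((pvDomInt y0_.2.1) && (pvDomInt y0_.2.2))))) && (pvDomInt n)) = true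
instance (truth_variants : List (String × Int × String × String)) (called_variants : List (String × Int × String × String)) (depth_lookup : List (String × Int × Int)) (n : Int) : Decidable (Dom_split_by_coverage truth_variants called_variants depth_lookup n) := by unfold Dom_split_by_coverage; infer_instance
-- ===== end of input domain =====

-- B replaces A's three passes over the materialised set operations (∩, two −) by one pass over
-- the union that derives the TP/FP/FN category from two membership tests (objective: alternative).
-- Both programs only COUNT while iterating over sets, so the result is independent of Python's
-- set iteration order and the list order used by the ports is faithful.

-- ===== PORT A =====
-- shared helper: 'depth_lookup.get((chrom, pos), 0) <= n'
def pvBucketLE (d : PySem.Dict (String × Int) Int) (n : Int) (v : String × Int × String × String) : Bool :=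
  decide (d.getD (v.1, v.2.1) 0 ≤ n)

def split_by_coverage (truth_variants : List (String × Int × String × String)) (called_variants : List (String × Int × String × String)) (depth_lookup : List (String × Int × Int)) (n : Int) : List (String × List (String × Int)) :=
  let d : PySem.Dict (String × Int) Int := PySem.Dict.ofList (depth_lookup.map (fun t => ((t.1, t.2.1), t.2.2)))
  let tset := PySem.Set.ofList truth_variants
  let cset := PySem.Set.ofList called_variants
  -- split = {"le_n": {...0...}, "gt_n": {...0...}} encoded as ((TP,FP,FN)_le, (TP,FP,FN)_gt)
  let s0 : (Int × Int × Int) × (Int × Int × Int) := ((0, 0, 0), (0, 0, 0))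
  -- for … in truth_variants & called_variants: split[bucket]["TP"] += 1
  let s1 := (PySem.Set.inter tset cset).foldl (fun s v =>
      if pvBucketLE d n v then ((s.1.1 + 1, s.1.2.1, s.1.2.2), s.2)
      else (s.1, (s.2.1 + 1, s.2.2.1, s.2.2.2))) s0
  -- for … in called_variants - truth_variants: split[bucket]["FP"] += 1
  let s2 := (PySem.Set.diff cset tset).foldl (fun s v =>
      if pvBucketLE d n v then ((s.1.1, s.1.2.1 + 1, s.1.2.2), s.2)
      else (s.1, (s.2.1, s.2.2.1 + 1, s.2.2.2))) s1
  -- for … in truth_variants - called_variants: split[bucket]["FN"] += 1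
  let s3 := (PySem.Set.diff tset cset).foldl (fun s v =>
      if pvBucketLE d n v then ((s.1.1, s.1.2.1, s.1.2.2 + 1), s.2)
      else (s.1, (s.2.1, s.2.2.1, s.2.2.2 + 1))) s2
  [("le_n", [("TP", s3.1.1), ("FP", s3.1.2.1), ("FN", s3.1.2.2)]),
   ("gt_n", [("TP", s3.2.1), ("FP", s3.2.2.1), ("FN", s3.2.2.2)])]

-- ===== PORT B =====
def split_by_coverage_alt (truth_variants : List (String × Int × String × String)) (called_variants : List (String × Int × String × String)) (depth_lookup : List (String × Int × Int)) (n : Int) : List (String × List (String × Int)) :=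
  let d : PySem.Dict (String × Int) Int := PySem.Dict.ofList (depth_lookup.map (fun t => ((t.1, t.2.1), t.2.2)))
  let tset := PySem.Set.ofList truth_variants
  let cset := PySem.Set.ofList called_variants
  -- single loop over truth_variants | called_variants
  let s := (PySem.Set.union tset cset).foldl (fun s v =>
      let inT := PySem.Set.contains tset v
      let inC := PySem.Set.contains cset v
      -- category = "TP" if in_t and in_c else ("FP" if in_c else "FN")
      let bump : Int × Int × Int → Int × Int × Int := fun b =>
        if inT && inC then (b.1 + 1, b.2.1, b.2.2)
        else if inC then (b.1, b.2.1 + 1, b.2.2)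
        else (b.1, b.2.1, b.2.2 + 1)
      if pvBucketLE d n v then (bump s.1, s.2) else (s.1, bump s.2))
    ((0, 0, 0), (0, 0, 0))
  [("le_n", [("TP", s.1.1), ("FP", s.1.2.1), ("FN", s.1.2.2)]),
   ("gt_n", [("TP", s.2.1), ("FP", s.2.2.1), ("FN", s.2.2.2)])]

-- ===== PRECONDITION & SPEC =====
def Spec_split_by_coverage (truth_variants : List (String × Int × String × String)) (called_variants : List (String × Int × String × String)) (depth_lookup : List (String × Int × Int)) (n : Int) (out : List (String × List (String × Int))) : Prop := out = split_by_coverage_alt truth_variants called_variants depth_lookup n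
instance (truth_variants : List (String × Int × String × String)) (called_variants : List (String × Int × String × String)) (depth_lookup : List (String × Int × Int)) (n : Int) (out : List (String × List (String × Int))) : Decidable (Spec_split_by_coverage truth_variants called_variants depth_lookup n out) := by unfold Spec_split_by_coverage; infer_instance

-- ===== CLAIM (what is proved, stated in full; the proofs are below) =====
def Claim_equal_split_by_coverage : Prop := ∀ (truth_variants : List (String × Int × String × String)) (called_variants : List (String × Int × String × String)) (depth_lookup : List (String × Int × Int)) (n : Int), Dom_split_by_coverage truth_variants called_variants depth_lookup n → Spec_split_by_coverage truth_variants called_variants depth_lookup n (split_by_coverage truth_variants called_variants depth_lookup n)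

-- ===== LEMMAS AND PROOFS =====
-- A's TP loop adds the le-count to slot 1 of the first triple and the gt-count to slot 1 of the second.
theorem loopTP (p : (String × Int × String × String) → Bool) (l : List (String × Int × String × String))
    (s : (Int × Int × Int) × (Int × Int × Int)) :
    l.foldl (fun s v => if p v then ((s.1.1 + 1, s.1.2.1, s.1.2.2), s.2)
      else (s.1, (s.2.1 + 1, s.2.2.1, s.2.2.2))) s
    = ((s.1.1 + l.countP p, s.1.2.1, s.1.2.2),
       (s.2.1 + l.countP (fun v => !p v), s.2.2.1, s.2.2.2)) := by
  induction l generalizing s with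
  | nil => simp
  | cons a l ih =>
    simp only [List.foldl_cons, List.countP_cons, ih]
    by_cases h : p a <;> simp [h, Prod.ext_iff] <;> omega

theorem loopFP (p : (String × Int × String × String) → Bool) (l : List (String × Int × String × String))
    (s : (Int × Int × Int) × (Int × Int × Int)) :
    l.foldl (fun s v => if p v then ((s.1.1, s.1.2.1 + 1, s.1.2.2), s.2)
      else (s.1, (s.2.1, s.2.2.1 + 1, s.2.2.2))) s
    = ((s.1.1, s.1.2.1 + l.countP p, s.1.2.2),
       (s.2.1, s.2.2.1 + l.countP (fun v => !p v), s.2.2.2)) := by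
  induction l generalizing s with
  | nil => simp
  | cons a l ih =>
    simp only [List.foldl_cons, List.countP_cons, ih]
    by_cases h : p a <;> simp [h, Prod.ext_iff] <;> omega

theorem loopFN (p : (String × Int × String × String) → Bool) (l : List (String × Int × String × String))
    (s : (Int × Int × Int) × (Int × Int × Int)) :
    l.foldl (fun s v => if p v then ((s.1.1, s.1.2.1, s.1.2.2 + 1), s.2)
      else (s.1, (s.2.1, s.2.2.1, s.2.2.2 + 1))) s
    = ((s.1.1, s.1.2.1, s.1.2.2 + l.countP p),
       (s.2.1, s.2.2.1, s.2.2.2 + l.countP (fun v => !p v))) := by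
  induction l generalizing s with
  | nil => simp
  | cons a l ih =>
    simp only [List.foldl_cons, List.countP_cons, ih]
    by_cases h : p a <;> simp [h, Prod.ext_iff] <;> omega

-- B's single loop adds six classified counts.
theorem loopB (p t c : (String × Int × String × String) → Bool) (l : List (String × Int × String × String))
    (s : (Int × Int × Int) × (Int × Int × Int)) :
    l.foldl (fun s v =>
      let bump : Int × Int × Int → Int × Int × Int := fun b =>
        if t v && c v then (b.1 + 1, b.2.1, b.2.2)
        else if c v then (b.1, b.2.1 + 1, b.2.2)
        else (b.1, b.2.1, b.2.2 + 1)
      if p v then (bump s.1, s.2) else (s.1, bump s.2)) s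
    = ((s.1.1 + l.countP (fun v => p v && (t v && c v)),
        s.1.2.1 + l.countP (fun v => p v && (!(t v && c v) && c v)),
        s.1.2.2 + l.countP (fun v => p v && (!(t v && c v) && !c v))),
       (s.2.1 + l.countP (fun v => !p v && (t v && c v)),
        s.2.2.1 + l.countP (fun v => !p v && (!(t v && c v) && c v)),
        s.2.2.2 + l.countP (fun v => !p v && (!(t v && c v) && !c v)))) := by
  induction l generalizing s with
  | nil => simp
  | cons a l ih =>
    simp only [List.foldl_cons, List.countP_cons, ih]
    by_cases hp : p a <;> by_cases ht : t a <;> by_cases hc : c a <;>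
      simp [hp, ht, hc, Prod.ext_iff] <;> omega

-- ===== VERDICT (by name: the statement is the Claim_ definition above) =====
theorem split_by_coverage_spec : Claim_equal_split_by_coverage := by
  intro T C dl n _
  unfold Spec_split_by_coverage split_by_coverage split_by_coverage_alt
  simp only []
  set d := PySem.Dict.ofList (dl.map (fun t => ((t.1, t.2.1), t.2.2))) with hd
  set p := pvBucketLE d n with hp
  set tset := PySem.Set.ofList T with htset
  set cset := PySem.Set.ofList C with hcset
  have hUnion : PySem.Set.union tset cset
      = tset ++ cset.filter (fun y => !(PySem.Set.contains tset y)) := by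
    have h2 : PySem.Set.ofList (cset : List _) = cset :=
      PySem.Set.ofList_eq_self_of_nodup (cset : List _) (PySem.Set.nodup_ofList C)
    calc PySem.Set.union tset cset
        = tset ++ (PySem.Set.ofList (cset : List _)).filter (fun y => !(PySem.Set.contains tset y)) :=
          PySem.Set.update_eq_append_filter ..
      _ = _ := by rw [h2]
  rw [loopTP, loopFP, loopFN, loopB, hUnion]
  have memT : ∀ v ∈ tset, PySem.Set.contains tset v = true := by
    intro v hv; exact (PySem.Set.contains_iff tset v).mpr hv
  have memC : ∀ v ∈ cset, PySem.Set.contains cset v = true := by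
    intro v hv; exact (PySem.Set.contains_iff cset v).mpr hv
  -- the six count equalities
  have hinter : PySem.Set.inter tset cset = tset.filter (fun x => PySem.Set.contains cset x) := rfl
  have hdiffCT : PySem.Set.diff cset tset = cset.filter (fun x => !PySem.Set.contains tset x) := rfl
  have hdiffTC : PySem.Set.diff tset cset = tset.filter (fun x => !PySem.Set.contains cset x) := rfl
  have key : ∀ (q : (String × Int × String × String) → Bool),
      -- on the T-part inT = true; on the (C \ T)-part inT = false, inC = true
      (tset ++ cset.filter (fun y => !(PySem.Set.contains tset y))).countP
        (fun v => q v && (PySem.Set.contains tset v && PySem.Set.contains cset v))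
        = (PySem.Set.inter tset cset).countP q
      ∧ (tset ++ cset.filter (fun y => !(PySem.Set.contains tset y))).countP
        (fun v => q v && (!(PySem.Set.contains tset v && PySem.Set.contains cset v) && PySem.Set.contains cset v))
        = (PySem.Set.diff cset tset).countP q
      ∧ (tset ++ cset.filter (fun y => !(PySem.Set.contains tset y))).countP
        (fun v => q v && (!(PySem.Set.contains tset v && PySem.Set.contains cset v) && !PySem.Set.contains cset v))
        = (PySem.Set.diff tset cset).countP q := by
    intro q
    refine ⟨?_, ?_, ?_⟩
    · rw [List.countP_append]
      have h1 : tset.countP (fun v => q v && (PySem.Set.contains tset v && PySem.Set.contains cset v))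
          = tset.countP (fun v => q v && PySem.Set.contains cset v) :=
        List.countP_congr (by intro v hv; simp [hv])
      have h2 : (cset.filter (fun y => !(PySem.Set.contains tset y))).countP
          (fun v => q v && (PySem.Set.contains tset v && PySem.Set.contains cset v)) = 0 := by
        rw [List.countP_eq_zero]
        intro v hv
        have hnt : v ∉ tset := by
          simpa using List.of_mem_filter hv
        simp [hnt]
      rw [h1, h2, hinter, List.countP_filter]
      omega
    · rw [List.countP_append]
      have h1 : tset.countP
          (fun v => q v && (!(PySem.Set.contains tset v && PySem.Set.contains cset v) && PySem.Set.contains cset v))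
          = 0 := by
        rw [List.countP_eq_zero]
        intro v hv
        simp [hv]
      have h2 : (cset.filter (fun y => !(PySem.Set.contains tset y))).countP
          (fun v => q v && (!(PySem.Set.contains tset v && PySem.Set.contains cset v) && PySem.Set.contains cset v))
          = (cset.filter (fun x => !PySem.Set.contains tset x)).countP q :=
        List.countP_congr (by
          intro v hv
          have hmem := List.mem_of_mem_filter hv
          have hnt : v ∉ tset := by
            simpa using List.of_mem_filter hv
          simp [hnt, hmem])
      rw [h1, h2, hdiffCT]
      omega
    · rw [List.countP_append]
      have h1 : tset.countP
          (fun v => q v && (!(PySem.Set.contains tset v && PySem.Set.contains cset v) && !PySem.Set.contains cset v))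
          = tset.countP (fun v => q v && !PySem.Set.contains cset v) :=
        List.countP_congr (by
          intro v hv
          cases hb : PySem.Set.contains cset v <;> simp [hv])
      have h2 : (cset.filter (fun y => !(PySem.Set.contains tset y))).countP
          (fun v => q v && (!(PySem.Set.contains tset v && PySem.Set.contains cset v) && !PySem.Set.contains cset v))
          = 0 := by
        rw [List.countP_eq_zero]
        intro v hv
        have hmem : v ∈ cset := List.mem_of_mem_filter hv
        simp [hmem]
      rw [h1, h2, hdiffTC, List.countP_filter]
      omega
  obtain ⟨k1, k2, k3⟩ := key p
  obtain ⟨k4, k5, k6⟩ := key (fun v => !p v)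
  simp only [k1, k2, k3, k4, k5, k6, zero_add]
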